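-- pv_equiv track=rewrite | github.com/tachbatz/gtfs | pages.py | histogram_list_trip_per_hours
-- ===== SOURCE A (Python) =====
-- def histogram_list_trip_per_hours(times):
--   # input: list of strings (Hours range)
--   # output: list of integers.
--   histo=[0 for i in range(11)]
--   # 04-06: 0, 06-08: 1, 08-10: 2, 10-12: 3, 12-14: 4, 14-16: 5, 16-18: 6, 18-20: 7, 20-22:8, 22-24:9, 24 until end of service: 10
--   # Day trips are between the hours 04-28 where 24-28 is the early morning of the day afterwards
--   bins = ["06:00:00", "08:00:00", "10:00:00", "12:00:00", "14:00:00", "16:00:00", "18:00:00", "20:00:00", "22:00:00", "24:00:00", "28:00:00"]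
--   for time in times:              # for each time in times list
--     for i in range(len(bins)):    # for each bin from the bins list
--       if time<bins[i]:            # if current time is lower than the bin,
--         histo[i]+=1               # then add it to the bin
--         break                     # and continue to the next time
--   return histo
-- ===== SOURCE B (Python) =====
-- def histogram_list_trip_per_hours(times):
--   # input: list of strings (Hours range)
--   # output: list of integers.
--   bins = ["06:00:00", "08:00:00", "10:00:00", "12:00:00", "14:00:00", "16:00:00", "18:00:00", "20:00:00", "22:00:00", "24:00:00", "28:00:00"]
--   histo = [0] * 11
--   for time in times:
--     # binary search: first index whose cutoff is strictly greater than time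
--     lo, hi = 0, 11
--     while lo < hi:
--       mid = (lo + hi) // 2
--       if time < bins[mid]:
--         hi = mid
--       else:
--         lo = mid + 1
--     if lo < 11:
--       histo[lo] += 1
--   return histo
-- ===== Notes on version B (the rewrite author's own statement) =====
-- stated objective: faster
-- what changed: Replaces A's linear break-on-first-match scan over the 11 cutoffs per time with a hand-written bisect_right binary search over the same sorted cutoff list, incrementing the found bucket only when the index is below 11.
import Mathlib
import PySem

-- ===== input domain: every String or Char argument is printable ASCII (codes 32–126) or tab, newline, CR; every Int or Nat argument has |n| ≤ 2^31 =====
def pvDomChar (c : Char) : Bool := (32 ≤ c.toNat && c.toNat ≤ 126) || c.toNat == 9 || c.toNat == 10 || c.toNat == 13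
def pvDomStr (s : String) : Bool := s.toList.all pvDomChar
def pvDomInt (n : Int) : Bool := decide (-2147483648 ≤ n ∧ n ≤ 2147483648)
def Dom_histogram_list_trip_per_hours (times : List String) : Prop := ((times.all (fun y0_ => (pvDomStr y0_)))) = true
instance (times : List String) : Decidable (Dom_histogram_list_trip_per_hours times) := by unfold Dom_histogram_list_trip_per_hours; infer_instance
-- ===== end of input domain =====

-- B replaces A's linear first-cutoff scan per time with a hand-written binary search over the
-- same sorted cutoff list (objective: alternative/idiomatic; same result for every input).
-- Python `s < t` on strings is code-point lexicographic = Lean `<` on s.toList (PySem convention).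

-- ===== PORT A =====
def pvBinsA : List String := ["06:00:00", "08:00:00", "10:00:00", "12:00:00", "14:00:00", "16:00:00", "18:00:00", "20:00:00", "22:00:00", "24:00:00", "28:00:00"]

-- inner `for i in range(len(bins)): if time < bins[i]: histo[i] += 1; break`
-- (index i is always in range, so bins[i] is List.getD; str `<` is `<` on .toList)
def pvScanA (time : String) (histo : List Int) : List Nat → List Int
  | [] => histo
  | i :: rest =>
    if time.toList < (pvBinsA.getD i "").toList then histo.set i (histo.getD i 0 + 1)
    else pvScanA time histo rest

def histogram_list_trip_per_hours (times : List String) : List Int :=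
  times.foldl (fun histo time => pvScanA time histo (List.range pvBinsA.length))
    (List.replicate 11 (0 : Int))

-- ===== PORT B =====
def pvBinsB : List String := ["06:00:00", "08:00:00", "10:00:00", "12:00:00", "14:00:00", "16:00:00", "18:00:00", "20:00:00", "22:00:00", "24:00:00", "28:00:00"]

-- Source B's hand-written `while lo < hi` binary search (a[mid] is in range, so List.getD)
def pvBisect (a : List String) (x : String) (lo hi : Nat) : Nat :=
  if lo < hi then
    let mid := (lo + hi) / 2
    if x.toList < (a.getD mid "").toList then pvBisect a x lo mid else pvBisect a x (mid + 1) hi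
  else lo
termination_by hi - lo
decreasing_by all_goals omega

def pvStepB (histo : List Int) (time : String) : List Int :=
  let lo := pvBisect pvBinsB time 0 11
  if lo < 11 then histo.set lo (histo.getD lo 0 + 1) else histo

def histogram_list_trip_per_hours_alt (times : List String) : List Int :=
  times.foldl pvStepB (List.replicate 11 (0 : Int))

-- ===== PRECONDITION & SPEC =====
def Spec_histogram_list_trip_per_hours (times : List String) (out : List Int) : Prop := out = histogram_list_trip_per_hours_alt times
instance (times : List String) (out : List Int) : Decidable (Spec_histogram_list_trip_per_hours times out) := by unfold Spec_histogram_list_trip_per_hours; infer_instance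

-- ===== CLAIM (what is proved, stated in full; the proofs are below) =====
def Claim_equal_histogram_list_trip_per_hours : Prop := ∀ (times : List String), Dom_histogram_list_trip_per_hours times → Spec_histogram_list_trip_per_hours times (histogram_list_trip_per_hours times)

-- ===== LEMMAS AND PROOFS =====

-- per-time step agreement: the first cutoff strictly above `time` found by the linear scan
-- is the index the binary search returns (case split on the 11 cutoff comparisons;
-- monotonicity of the sorted cutoffs supplies the remaining comparisons)
lemma pv_step_eq (time : String) (histo : List Int) :
    pvScanA time histo (List.range pvBinsA.length) = pvStepB histo time := by
  have hr : List.range pvBinsA.length = [0, 1, 2, 3, 4, 5, 6, 7, 8, 9, 10] := by decide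
  rw [hr]
  by_cases h0 : time.toList < ['0', '6', ':', '0', '0', ':', '0', '0']
  ·
    have h1 : time.toList < ['0', '8', ':', '0', '0', ':', '0', '0'] := lt_trans h0 (by decide)
    have h2 : time.toList < ['1', '0', ':', '0', '0', ':', '0', '0'] := lt_trans h0 (by decide)
    have h3 : time.toList < ['1', '2', ':', '0', '0', ':', '0', '0'] := lt_trans h0 (by decide)
    have h4 : time.toList < ['1', '4', ':', '0', '0', ':', '0', '0'] := lt_trans h0 (by decide)
    have h5 : time.toList < ['1', '6', ':', '0', '0', ':', '0', '0'] := lt_trans h0 (by decide)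
    have h6 : time.toList < ['1', '8', ':', '0', '0', ':', '0', '0'] := lt_trans h0 (by decide)
    have h7 : time.toList < ['2', '0', ':', '0', '0', ':', '0', '0'] := lt_trans h0 (by decide)
    have h8 : time.toList < ['2', '2', ':', '0', '0', ':', '0', '0'] := lt_trans h0 (by decide)
    have h9 : time.toList < ['2', '4', ':', '0', '0', ':', '0', '0'] := lt_trans h0 (by decide)
    have h10 : time.toList < ['2', '8', ':', '0', '0', ':', '0', '0'] := lt_trans h0 (by decide)
    simp [pvScanA, pvStepB, pvBisect, pvBinsA, pvBinsB, h0, h1, h2, h5]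
  by_cases h1 : time.toList < ['0', '8', ':', '0', '0', ':', '0', '0']
  ·
    have h2 : time.toList < ['1', '0', ':', '0', '0', ':', '0', '0'] := lt_trans h1 (by decide)
    have h3 : time.toList < ['1', '2', ':', '0', '0', ':', '0', '0'] := lt_trans h1 (by decide)
    have h4 : time.toList < ['1', '4', ':', '0', '0', ':', '0', '0'] := lt_trans h1 (by decide)
    have h5 : time.toList < ['1', '6', ':', '0', '0', ':', '0', '0'] := lt_trans h1 (by decide)
    have h6 : time.toList < ['1', '8', ':', '0', '0', ':', '0', '0'] := lt_trans h1 (by decide)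
    have h7 : time.toList < ['2', '0', ':', '0', '0', ':', '0', '0'] := lt_trans h1 (by decide)
    have h8 : time.toList < ['2', '2', ':', '0', '0', ':', '0', '0'] := lt_trans h1 (by decide)
    have h9 : time.toList < ['2', '4', ':', '0', '0', ':', '0', '0'] := lt_trans h1 (by decide)
    have h10 : time.toList < ['2', '8', ':', '0', '0', ':', '0', '0'] := lt_trans h1 (by decide)
    simp [pvScanA, pvStepB, pvBisect, pvBinsA, pvBinsB, h0, h1, h2, h5]
  by_cases h2 : time.toList < ['1', '0', ':', '0', '0', ':', '0', '0']
  ·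
    have h3 : time.toList < ['1', '2', ':', '0', '0', ':', '0', '0'] := lt_trans h2 (by decide)
    have h4 : time.toList < ['1', '4', ':', '0', '0', ':', '0', '0'] := lt_trans h2 (by decide)
    have h5 : time.toList < ['1', '6', ':', '0', '0', ':', '0', '0'] := lt_trans h2 (by decide)
    have h6 : time.toList < ['1', '8', ':', '0', '0', ':', '0', '0'] := lt_trans h2 (by decide)
    have h7 : time.toList < ['2', '0', ':', '0', '0', ':', '0', '0'] := lt_trans h2 (by decide)
    have h8 : time.toList < ['2', '2', ':', '0', '0', ':', '0', '0'] := lt_trans h2 (by decide)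
    have h9 : time.toList < ['2', '4', ':', '0', '0', ':', '0', '0'] := lt_trans h2 (by decide)
    have h10 : time.toList < ['2', '8', ':', '0', '0', ':', '0', '0'] := lt_trans h2 (by decide)
    simp [pvScanA, pvStepB, pvBisect, pvBinsA, pvBinsB, h0, h1, h2, h5]
  by_cases h3 : time.toList < ['1', '2', ':', '0', '0', ':', '0', '0']
  ·
    have h4 : time.toList < ['1', '4', ':', '0', '0', ':', '0', '0'] := lt_trans h3 (by decide)
    have h5 : time.toList < ['1', '6', ':', '0', '0', ':', '0', '0'] := lt_trans h3 (by decide)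
    have h6 : time.toList < ['1', '8', ':', '0', '0', ':', '0', '0'] := lt_trans h3 (by decide)
    have h7 : time.toList < ['2', '0', ':', '0', '0', ':', '0', '0'] := lt_trans h3 (by decide)
    have h8 : time.toList < ['2', '2', ':', '0', '0', ':', '0', '0'] := lt_trans h3 (by decide)
    have h9 : time.toList < ['2', '4', ':', '0', '0', ':', '0', '0'] := lt_trans h3 (by decide)
    have h10 : time.toList < ['2', '8', ':', '0', '0', ':', '0', '0'] := lt_trans h3 (by decide)
    simp [pvScanA, pvStepB, pvBisect, pvBinsA, pvBinsB, h0, h1, h2, h3, h4, h5]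
  by_cases h4 : time.toList < ['1', '4', ':', '0', '0', ':', '0', '0']
  ·
    have h5 : time.toList < ['1', '6', ':', '0', '0', ':', '0', '0'] := lt_trans h4 (by decide)
    have h6 : time.toList < ['1', '8', ':', '0', '0', ':', '0', '0'] := lt_trans h4 (by decide)
    have h7 : time.toList < ['2', '0', ':', '0', '0', ':', '0', '0'] := lt_trans h4 (by decide)
    have h8 : time.toList < ['2', '2', ':', '0', '0', ':', '0', '0'] := lt_trans h4 (by decide)
    have h9 : time.toList < ['2', '4', ':', '0', '0', ':', '0', '0'] := lt_trans h4 (by decide)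
    have h10 : time.toList < ['2', '8', ':', '0', '0', ':', '0', '0'] := lt_trans h4 (by decide)
    simp [pvScanA, pvStepB, pvBisect, pvBinsA, pvBinsB, h0, h1, h2, h3, h4, h5]
  by_cases h5 : time.toList < ['1', '6', ':', '0', '0', ':', '0', '0']
  ·
    have h6 : time.toList < ['1', '8', ':', '0', '0', ':', '0', '0'] := lt_trans h5 (by decide)
    have h7 : time.toList < ['2', '0', ':', '0', '0', ':', '0', '0'] := lt_trans h5 (by decide)
    have h8 : time.toList < ['2', '2', ':', '0', '0', ':', '0', '0'] := lt_trans h5 (by decide)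
    have h9 : time.toList < ['2', '4', ':', '0', '0', ':', '0', '0'] := lt_trans h5 (by decide)
    have h10 : time.toList < ['2', '8', ':', '0', '0', ':', '0', '0'] := lt_trans h5 (by decide)
    simp [pvScanA, pvStepB, pvBisect, pvBinsA, pvBinsB, h0, h1, h2, h3, h4, h5]
  by_cases h6 : time.toList < ['1', '8', ':', '0', '0', ':', '0', '0']
  ·
    have h7 : time.toList < ['2', '0', ':', '0', '0', ':', '0', '0'] := lt_trans h6 (by decide)
    have h8 : time.toList < ['2', '2', ':', '0', '0', ':', '0', '0'] := lt_trans h6 (by decide)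
    have h9 : time.toList < ['2', '4', ':', '0', '0', ':', '0', '0'] := lt_trans h6 (by decide)
    have h10 : time.toList < ['2', '8', ':', '0', '0', ':', '0', '0'] := lt_trans h6 (by decide)
    simp [pvScanA, pvStepB, pvBisect, pvBinsA, pvBinsB, h0, h1, h2, h3, h4, h5, h6, h7, h8]
  by_cases h7 : time.toList < ['2', '0', ':', '0', '0', ':', '0', '0']
  ·
    have h8 : time.toList < ['2', '2', ':', '0', '0', ':', '0', '0'] := lt_trans h7 (by decide)
    have h9 : time.toList < ['2', '4', ':', '0', '0', ':', '0', '0'] := lt_trans h7 (by decide)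
    have h10 : time.toList < ['2', '8', ':', '0', '0', ':', '0', '0'] := lt_trans h7 (by decide)
    simp [pvScanA, pvStepB, pvBisect, pvBinsA, pvBinsB, h0, h1, h2, h3, h4, h5, h6, h7, h8]
  by_cases h8 : time.toList < ['2', '2', ':', '0', '0', ':', '0', '0']
  ·
    have h9 : time.toList < ['2', '4', ':', '0', '0', ':', '0', '0'] := lt_trans h8 (by decide)
    have h10 : time.toList < ['2', '8', ':', '0', '0', ':', '0', '0'] := lt_trans h8 (by decide)
    simp [pvScanA, pvStepB, pvBisect, pvBinsA, pvBinsB, h0, h1, h2, h3, h4, h5, h6, h7, h8]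
  by_cases h9 : time.toList < ['2', '4', ':', '0', '0', ':', '0', '0']
  ·
    have h10 : time.toList < ['2', '8', ':', '0', '0', ':', '0', '0'] := lt_trans h9 (by decide)
    simp [pvScanA, pvStepB, pvBisect, pvBinsA, pvBinsB, h0, h1, h2, h3, h4, h5, h6, h7, h8, h9, h10]
  by_cases h10 : time.toList < ['2', '8', ':', '0', '0', ':', '0', '0']
  ·
    simp [pvScanA, pvStepB, pvBisect, pvBinsA, pvBinsB, h0, h1, h2, h3, h4, h5, h6, h7, h8, h9, h10]
  simp [pvScanA, pvStepB, pvBisect, pvBinsA, pvBinsB, h0, h1, h2, h3, h4, h5, h6, h7, h8, h9, h10]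

lemma pv_foldl_eq (times : List String) (init : List Int) :
    times.foldl (fun histo time => pvScanA time histo (List.range pvBinsA.length)) init =
      times.foldl pvStepB init := by
  simp only [pv_step_eq]

-- ===== VERDICT (by name: the statement is the Claim_ definition above) =====
theorem histogram_list_trip_per_hours_spec : Claim_equal_histogram_list_trip_per_hours := by
  intro times _
  unfold Spec_histogram_list_trip_per_hours histogram_list_trip_per_hours histogram_list_trip_per_hours_alt
  exact pv_foldl_eq times _
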